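-- pv_equiv track=rewrite | github.com/vwraith55/markdown | markdown_compiler/util/line_functions.py | compile_headers
-- ===== SOURCE A (Python) =====
-- def compile_headers(line):
--     '''
--     Convert markdown headers into <h1>,<h2>,etc tags.
--
--     >>> compile_headers('# This is the main header')
--     '<h1> This is the main header</h1>'
--     >>> compile_headers('## This is a sub-header')
--     '<h2> This is a sub-header</h2>'
--     >>> compile_headers('### This is a sub-header')
--     '<h3> This is a sub-header</h3>'
--     >>> compile_headers('#### This is a sub-header')
--     '<h4> This is a sub-header</h4>'
--     >>> compile_headers('##### This is a sub-header')
--     '<h5> This is a sub-header</h5>'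
--     >>> compile_headers('###### This is a sub-header')
--     '<h6> This is a sub-header</h6>'
--     >>> compile_headers('      # this is not a header')
--     '      # this is not a header'
--     '''
--     for level in range(6, 0, -1):
--         prefix = '#' * level
--         if line[:level] == prefix and (
--             len(line) == level or line[level] != '#'
--         ):
--             rest = line[level:]
--             return f'<h{level}>{rest}</h{level}>'
--     return line
-- ===== SOURCE B (Python) =====
-- def compile_headers(line):
--     # Count the leading '#' run once, then decide: header levels 1..6 get wrapped.
--     n = 0
--     while n < len(line) and line[n] == '#':
--         n += 1
--     if 1 <= n <= 6:
--         rest = line[n:]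
--         return f'<h{n}>{rest}</h{n}>'
--     return line
-- ===== Notes on version B (the rewrite author's own statement) =====
-- stated objective: idiomatic
-- what changed: Replaces the six-level descending probing loop (prefix build + slice compare per level) by a single count of the leading '#' run followed by one range check.
import Mathlib
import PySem

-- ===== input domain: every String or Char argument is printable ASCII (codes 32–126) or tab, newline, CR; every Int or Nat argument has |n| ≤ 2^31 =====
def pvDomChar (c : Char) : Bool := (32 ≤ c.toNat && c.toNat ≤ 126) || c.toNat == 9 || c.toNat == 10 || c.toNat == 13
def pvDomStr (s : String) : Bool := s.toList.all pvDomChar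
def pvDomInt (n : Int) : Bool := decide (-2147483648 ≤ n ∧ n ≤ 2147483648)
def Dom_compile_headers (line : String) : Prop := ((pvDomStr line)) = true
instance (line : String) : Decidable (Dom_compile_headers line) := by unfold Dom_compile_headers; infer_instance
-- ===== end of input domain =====

-- B counts the leading '#' run once and branches on it, instead of A's six-level probing loop; same result, idiomatic.

-- ===== PORT A =====
-- the loop body for one level; '#' * level is replicate (level.toNat) '#' (levels are 6..1, nonnegative);
-- line[:level] is PySem.List.slice, line[level] is PySem.List.pyGet? (in range whenever evaluated, as in Python's
-- short-circuit); f'<h{level}>{rest}</h{level}>' is built as the same concatenation of character lists.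
def pvALoop : List Int → List Char → Option (List Char)
  | [], _ => none
  | level :: levels, cs =>
      let pre := List.replicate level.toNat '#'
      if PySem.List.slice cs none (some level) = pre ∧
         ((cs.length : Int) = level ∨ PySem.List.pyGet? cs level ≠ some '#') then
        some (('<' :: 'h' :: PySem.Int.toChars level) ++ '>' ::
              (PySem.List.slice cs (some level) none ++
               ('<' :: '/' :: 'h' :: PySem.Int.toChars level) ++ ['>']))
      else pvALoop levels cs

def compile_headers (line : String) : String :=
  match pvALoop (PySem.List.pyRange 6 0 (-1)) line.toList with
  | some r => String.ofList r
  | none => line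

-- ===== PORT B =====
-- the while loop 'n = 0; while n < len(line) and line[n] == '#': n += 1' as structural recursion on the chars
def pvCountHashes : List Char → Nat
  | [] => 0
  | c :: cs => if c = '#' then pvCountHashes cs + 1 else 0

def compile_headers_alt (line : String) : String :=
  let cs := line.toList
  let n := pvCountHashes cs
  if 1 ≤ n ∧ n ≤ 6 then
    String.ofList (('<' :: 'h' :: PySem.Int.toChars (n : Int)) ++ '>' ::
               (cs.drop n ++ ('<' :: '/' :: 'h' :: PySem.Int.toChars (n : Int)) ++ ['>']))
  else line

-- ===== PRECONDITION & SPEC =====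
def Spec_compile_headers (line : String) (out : String) : Prop := out = compile_headers_alt line
instance (line : String) (out : String) : Decidable (Spec_compile_headers line out) := by unfold Spec_compile_headers; infer_instance

-- ===== CLAIM (what is proved, stated in full; the proofs are below) =====
def Claim_equal_compile_headers : Prop := ∀ (line : String), Dom_compile_headers line → Spec_compile_headers line (compile_headers line)

-- ===== LEMMAS AND PROOFS =====

lemma pvCount_le_length (cs : List Char) : pvCountHashes cs ≤ cs.length := by
  induction cs with
  | nil => simp [pvCountHashes]
  | cons c cs ih => by_cases h : c = '#' <;> simp [pvCountHashes, h]; omega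

-- A's per-level condition (on the char list) holds exactly when the leading '#' run has length L
lemma pvCond_iff (L : Nat) (cs : List Char) :
    (List.take L cs = List.replicate L '#' ∧
      (cs.length = L ∨ cs[L]? ≠ some '#')) ↔ pvCountHashes cs = L := by
  induction L generalizing cs with
  | zero =>
    cases cs with
    | nil => simp [pvCountHashes]
    | cons c cs => by_cases h : c = '#' <;> simp [pvCountHashes, h]
  | succ L ih =>
    cases cs with
    | nil => simp [pvCountHashes]
    | cons c cs =>
      by_cases h : c = '#' <;>
        simp [pvCountHashes, h, List.replicate_succ, ih]

-- the same, phrased on the slice/pyGet? form A's port uses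
lemma pvCondA (k : Int) (hk : 0 ≤ k) (cs : List Char) :
    (PySem.List.slice cs none (some k) = List.replicate k.toNat '#' ∧
      ((cs.length : Int) = k ∨ PySem.List.pyGet? cs k ≠ some '#')) ↔
      (pvCountHashes cs : Int) = k := by
  obtain ⟨L, rfl⟩ : ∃ L : Nat, (L : Int) = k := ⟨k.toNat, Int.toNat_of_nonneg hk⟩
  rw [PySem.List.slice_to cs hk, PySem.List.pyGet?_natCast cs L]
  simp only [Int.toNat_natCast, Nat.cast_inj]
  exact pvCond_iff L cs

theorem compile_headers_spec : Claim_equal_compile_headers := by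
  intro line _
  unfold Spec_compile_headers compile_headers compile_headers_alt
  have hr : PySem.List.pyRange 6 0 (-1) = [6, 5, 4, 3, 2, 1] := by decide
  rw [hr]
  set cs := line.toList with hcs
  set n := pvCountHashes cs with hn
  have hle := pvCount_le_length cs
  simp only [pvALoop,
    pvCondA 6 (by norm_num) cs, pvCondA 5 (by norm_num) cs,
    pvCondA 4 (by norm_num) cs, pvCondA 3 (by norm_num) cs,
    pvCondA 2 (by norm_num) cs, pvCondA 1 (by norm_num) cs, ← hn]
  by_cases e6 : (n : Int) = 6
  · have h : n = 6 := by exact_mod_cast e6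
    rw [if_pos e6, if_pos (by omega : 1 ≤ n ∧ n ≤ 6), h,
        PySem.List.slice_from cs (by norm_num : (0:Int) ≤ 6), show Int.toNat 6 = 6 from rfl]; rfl
  · rw [if_neg e6]
    by_cases e5 : (n : Int) = 5
    · have h : n = 5 := by exact_mod_cast e5
      rw [if_pos e5, if_pos (by omega : 1 ≤ n ∧ n ≤ 6), h,
          PySem.List.slice_from cs (by norm_num : (0:Int) ≤ 5), show Int.toNat 5 = 5 from rfl]; rfl
    · rw [if_neg e5]
      by_cases e4 : (n : Int) = 4
      · have h : n = 4 := by exact_mod_cast e4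
        rw [if_pos e4, if_pos (by omega : 1 ≤ n ∧ n ≤ 6), h,
            PySem.List.slice_from cs (by norm_num : (0:Int) ≤ 4), show Int.toNat 4 = 4 from rfl]; rfl
      · rw [if_neg e4]
        by_cases e3 : (n : Int) = 3
        · have h : n = 3 := by exact_mod_cast e3
          rw [if_pos e3, if_pos (by omega : 1 ≤ n ∧ n ≤ 6), h,
              PySem.List.slice_from cs (by norm_num : (0:Int) ≤ 3), show Int.toNat 3 = 3 from rfl]; rfl
        · rw [if_neg e3]
          by_cases e2 : (n : Int) = 2
          · have h : n = 2 := by exact_mod_cast e2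
            rw [if_pos e2, if_pos (by omega : 1 ≤ n ∧ n ≤ 6), h,
                PySem.List.slice_from cs (by norm_num : (0:Int) ≤ 2), show Int.toNat 2 = 2 from rfl]; rfl
          · rw [if_neg e2]
            by_cases e1 : (n : Int) = 1
            · have h : n = 1 := by exact_mod_cast e1
              rw [if_pos e1, if_pos (by omega : 1 ≤ n ∧ n ≤ 6), h,
                  PySem.List.slice_from cs (by norm_num : (0:Int) ≤ 1), show Int.toNat 1 = 1 from rfl]; rfl
            · have hn6 : ¬ (1 ≤ n ∧ n ≤ 6) := by omega
              rw [if_neg e1, if_neg hn6]
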